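-- pv_equiv track=rewrite | github.com/AmruthaRajendran/Python-Programs | Contest_Duration.py | minduration
-- ===== SOURCE A (Python) =====
-- def minduration(lst,n):
--     ans = 0
--     i = 0
--     l =n - n%3
--     while(i<l):
--         m = min(lst[i],lst[i+1],lst[i+2])
--         ans += m
--         i += 3
--     if(n%3 == 0):
--         return(ans)
--     r = n%3
--     if(r == 1):
--         return(ans+lst[n-1])
--     else:
--         return(ans+min(lst[n-1],lst[n-2]))
-- ===== SOURCE B (Python) =====
-- def minduration(lst, n):
--     # Streaming state machine: one pass over lst[:n] keeping (running total,
--     # current-chunk min, chunk fill count); flush every 3 elements and at the end.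
--     total = 0
--     cur = None
--     cnt = 0
--     for x in lst[:n]:
--         cur = x if cur is None or x < cur else cur
--         cnt += 1
--         if cnt == 3:
--             total += cur
--             cur = None
--             cnt = 0
--     if cur is not None:
--         total += cur
--     return total
-- ===== Notes on version B (the rewrite author's own statement) =====
-- stated objective: alternative
-- what changed: Replaces the indexed while loop over triples plus three remainder branches by a single streaming state machine: one pass over lst[:n] carrying (running total, current-chunk minimum, fill count), flushing the chunk minimum every third element and once at the end, so no index arithmetic, no 3-way min call and no remainder cases remain.
-- outside the precondition, e.g. on minduration([1, 2, 3, 4], -2): A returns 2, B returns 1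
import Mathlib
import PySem

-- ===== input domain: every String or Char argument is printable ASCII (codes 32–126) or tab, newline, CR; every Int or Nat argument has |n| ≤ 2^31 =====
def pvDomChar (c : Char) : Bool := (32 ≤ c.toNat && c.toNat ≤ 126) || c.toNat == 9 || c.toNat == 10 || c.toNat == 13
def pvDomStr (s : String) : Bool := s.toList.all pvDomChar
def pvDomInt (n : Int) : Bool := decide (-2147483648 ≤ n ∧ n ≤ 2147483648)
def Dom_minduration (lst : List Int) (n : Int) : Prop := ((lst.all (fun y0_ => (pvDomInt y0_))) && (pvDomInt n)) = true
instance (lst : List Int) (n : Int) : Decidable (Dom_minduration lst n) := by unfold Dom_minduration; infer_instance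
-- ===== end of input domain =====

-- B replaces the indexed triple loop + remainder branches by one streaming pass with a
-- (total, current-chunk min, count) state machine (objective: alternative decomposition).

-- ===== PORT A =====
-- while(i < l): ans += min(lst[i], lst[i+1], lst[i+2]); i += 3
def mindurLoop (lst : List Int) (l : Int) (i : Int) (ans : Int) : Int :=
  if i < l then
    mindurLoop lst l (i + 3)
      (ans + min (min (PySem.List.pyGetD lst i 0) (PySem.List.pyGetD lst (i + 1) 0))
                 (PySem.List.pyGetD lst (i + 2) 0))
  else ans
termination_by (l - i).toNat
decreasing_by omega

def minduration (lst : List Int) (n : Int) : Int :=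
  let l := n - PySem.Int.mod n 3
  let ans := mindurLoop lst l 0 0
  if PySem.Int.mod n 3 = 0 then ans
  else
    let r := PySem.Int.mod n 3
    if r = 1 then ans + PySem.List.pyGetD lst (n - 1) 0
    else ans + min (PySem.List.pyGetD lst (n - 1) 0) (PySem.List.pyGetD lst (n - 2) 0)

-- ===== PORT B =====
-- one step of the loop body: update chunk min, bump count, flush every third element
def chunkStep (st : Int × Option Int × Int) (x : Int) : Int × Option Int × Int :=
  let cur' := match st.2.1 with | none => x | some c => if x < c then x else c
  let cnt' := st.2.2 + 1
  if cnt' = 3 then (st.1 + cur', none, 0) else (st.1, some cur', cnt')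

-- final 'if cur is not None: total += cur'
def chunkFlush (st : Int × Option Int × Int) : Int :=
  match st.2.1 with | none => st.1 | some c => st.1 + c

def minduration_alt (lst : List Int) (n : Int) : Int :=
  chunkFlush ((PySem.List.slice lst none (some n)).foldl chunkStep (0, none, 0))

-- ===== PRECONDITION & SPEC =====
-- Pre_ restricts to the natural domain 0 ≤ n ≤ len(lst): for n > len A raises IndexError; for n < 0 A's value comes from negative-index wraparound (e.g.
-- lst[-2]), outside the task's natural domain.
def Pre_minduration (lst : List Int) (n : Int) : Prop := 0 ≤ n ∧ n ≤ lst.length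
instance (lst : List Int) (n : Int) : Decidable (Pre_minduration lst n) := by
  unfold Pre_minduration; infer_instance

def pvWitness_minduration : List Int × Int := ([4, 7, 1, 9, 2], 5)

def Spec_minduration (lst : List Int) (n : Int) (out : Int) : Prop := out = minduration_alt lst n
instance (lst : List Int) (n : Int) (out : Int) : Decidable (Spec_minduration lst n out) := by
  unfold Spec_minduration; infer_instance

-- ===== CLAIM (what is proved, stated in full; the proofs are below) =====
def Claim_equal_minduration : Prop := ∀ (lst : List Int) (n : Int), Dom_minduration lst n → Pre_minduration lst n → Spec_minduration lst n (minduration lst n)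

-- ===== LEMMAS AND PROOFS =====

theorem pyGetD_cons_succ (x : Int) (xs : List Int) (i : Int) (h : 0 ≤ i) :
    PySem.List.pyGetD (x :: xs) (i + 1) 0 = PySem.List.pyGetD xs i 0 := by
  obtain ⟨k, rfl⟩ : ∃ k : Nat, i = (k : Int) := ⟨i.toNat, by omega⟩
  have : ((k : Int) + 1) = ((k + 1 : Nat) : Int) := by push_cast; ring
  rw [this, PySem.List.pyGetD_natCast, PySem.List.pyGetD_natCast]
  simp [List.getD]

theorem mindurLoop_acc (lst : List Int) (l i ans : Int) :
    mindurLoop lst l i ans = ans + mindurLoop lst l i 0 := by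
  by_cases h : i < l
  · conv_lhs => rw [mindurLoop]
    conv_rhs => rw [mindurLoop]
    rw [if_pos h, if_pos h,
        mindurLoop_acc lst l (i + 3), mindurLoop_acc lst l (i + 3) (0 + _)]
    ring
  · conv_lhs => rw [mindurLoop]
    conv_rhs => rw [mindurLoop]
    rw [if_neg h, if_neg h]; ring
termination_by (l - i).toNat
decreasing_by all_goals omega

theorem pyGetD_cons3 (a b c : Int) (t : List Int) (j : Int) (hj : 0 ≤ j) :
    PySem.List.pyGetD (a :: b :: c :: t) (j + 3) 0 = PySem.List.pyGetD t j 0 := by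
  rw [(show j + 3 = ((j + 1) + 1) + 1 by ring), pyGetD_cons_succ a _ _ (by omega),
      pyGetD_cons_succ b _ _ (by omega), pyGetD_cons_succ c _ _ hj]

theorem mindurLoop_shift (a b c : Int) (t : List Int) (l i ans : Int) (hi : 0 ≤ i) :
    mindurLoop (a :: b :: c :: t) l (i + 3) ans = mindurLoop t (l - 3) i ans := by
  by_cases h : i < l - 3
  · conv_lhs => rw [mindurLoop]
    conv_rhs => rw [mindurLoop]
    rw [if_pos (by omega : i + 3 < l), if_pos h]
    rw [(show i + 3 + 2 = (i + 2) + 3 by ring), (show i + 3 + 1 = (i + 1) + 3 by ring)]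
    rw [pyGetD_cons3 a b c t i hi, pyGetD_cons3 a b c t (i + 1) (by omega),
        pyGetD_cons3 a b c t (i + 2) (by omega)]
    exact mindurLoop_shift a b c t l (i + 3) _ (by omega)
  · conv_lhs => rw [mindurLoop]
    conv_rhs => rw [mindurLoop]
    rw [if_neg (by omega : ¬ (i + 3 < l)), if_neg h]
termination_by (l - 3 - i).toNat
decreasing_by omega

theorem mod3_sub (n : Int) : PySem.Int.mod (n - 3) 3 = PySem.Int.mod n 3 := by
  rw [PySem.Int.mod_eq_emod_of_pos (a := n) (by norm_num),
      PySem.Int.mod_eq_emod_of_pos (a := n - 3) (by norm_num)]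
  omega

theorem minduration_step (a b c : Int) (t : List Int) (n : Int) (hn : 3 ≤ n) :
    minduration (a :: b :: c :: t) n = min (min a b) c + minduration t (n - 3) := by
  have hm : PySem.Int.mod n 3 = n % 3 := PySem.Int.mod_eq_emod_of_pos (a := n) (by norm_num)
  have hm' : PySem.Int.mod (n - 3) 3 = n % 3 := by rw [mod3_sub, hm]
  have hl : 0 < n - PySem.Int.mod n 3 := by rw [hm]; omega
  have hunroll : mindurLoop (a :: b :: c :: t) (n - PySem.Int.mod n 3) 0 0
      = min (min a b) c + mindurLoop t (n - 3 - PySem.Int.mod (n - 3) 3) 0 0 := by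
    rw [mindurLoop, if_pos hl]
    rw [mindurLoop_shift a b c t _ 0 _ le_rfl]
    rw [mindurLoop_acc]
    have : PySem.List.pyGetD (a :: b :: c :: t) 0 0 = a := by
      simp [PySem.List.pyGetD_zero_cons]
    have h1 : PySem.List.pyGetD (a :: b :: c :: t) (0 + 1) 0 = b := by
      rw [pyGetD_cons_succ a _ _ (by omega)]; simp [PySem.List.pyGetD_zero_cons]
    have h2 : PySem.List.pyGetD (a :: b :: c :: t) (0 + 2) 0 = c := by
      rw [(by ring : (0:Int) + 2 = 1 + 1), pyGetD_cons_succ a _ _ (by omega),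
          (by ring : (1:Int) = 0 + 1), pyGetD_cons_succ b _ _ (by omega)]
      simp [PySem.List.pyGetD_zero_cons]
    rw [this, h1, h2]
    have : n - PySem.Int.mod n 3 - 3 = n - 3 - PySem.Int.mod (n - 3) 3 := by
      rw [hm, hm']; ring
    rw [this]; ring
  have hidx : ∀ m : Int, 3 ≤ m →
      PySem.List.pyGetD (a :: b :: c :: t) m 0 = PySem.List.pyGetD t (m - 3) 0 := by
    intro m hm3
    rw [(by ring : m = ((m - 3) + 1 + 1) + 1),
        pyGetD_cons_succ a _ _ (by omega), pyGetD_cons_succ b _ _ (by omega),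
        pyGetD_cons_succ c _ _ (by omega)]
    ring_nf
  show (let l := n - PySem.Int.mod n 3; _) = _
  simp only [minduration, hunroll]
  rw [hm, hm']
  by_cases h0 : n % 3 = 0
  · simp [h0]
  · by_cases h1 : n % 3 = 1
    · have hn4 : 4 ≤ n := by omega
      simp only [h1]
      rw [hidx (n - 1) (by omega)]
      have e : n - 1 - 3 = n - 3 - 1 := by ring
      rw [e]; norm_num; ring
    · have hn5 : 5 ≤ n := by omega
      rw [hidx (n - 1) (by omega), hidx (n - 2) (by omega)]
      have e1 : n - 1 - 3 = n - 3 - 1 := by ring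
      have e2 : n - 2 - 3 = n - 3 - 2 := by ring
      rw [e1, e2, if_neg h0, if_neg h1, if_neg h0, if_neg h1]; ring

theorem mindurLoop_stop (lst : List Int) (l i ans : Int) (h : ¬ i < l) :
    mindurLoop lst l i ans = ans := by
  conv_lhs => rw [mindurLoop]
  rw [if_neg h]

theorem mod3_lit (m : Int) (h0 : 0 ≤ m) (h3 : m < 3) : PySem.Int.mod m 3 = m := by
  rw [PySem.Int.mod_eq_emod_of_pos (a := m) (by norm_num)]; omega

-- shifting the total component of the state commutes with the fold
theorem foldl_chunkStep_shift (xs : List Int) (T : Int) :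
    ∀ (t : Int) (cur : Option Int) (cnt : Int),
      xs.foldl chunkStep (T + t, cur, cnt)
        = ((xs.foldl chunkStep (t, cur, cnt)).1 + T,
           (xs.foldl chunkStep (t, cur, cnt)).2) := by
  induction xs with
  | nil => intro t cur cnt; simp [List.foldl]; ring
  | cons x xs ih =>
    intro t cur cnt
    cases cur with
    | none =>
      by_cases h : cnt + 1 = 3
      · simp only [List.foldl, chunkStep, if_pos h]
        rw [(show T + t + x = T + (t + x) by ring)]
        exact ih (t + x) none 0
      · simp only [List.foldl, chunkStep, if_neg h]
        exact ih t (some x) (cnt + 1)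
    | some c =>
      by_cases h : cnt + 1 = 3
      · simp only [List.foldl, chunkStep, if_pos h]
        rw [(show T + t + (if x < c then x else c) = T + (t + (if x < c then x else c)) by ring)]
        exact ih (t + (if x < c then x else c)) none 0
      · simp only [List.foldl, chunkStep, if_neg h]
        exact ih t (some (if x < c then x else c)) (cnt + 1)

theorem chunkFlush_shift (s : Int × Option Int × Int) (T : Int) :
    chunkFlush (s.1 + T, s.2) = T + chunkFlush s := by
  rcases s with ⟨t, cur, cnt⟩
  cases cur <;> simp [chunkFlush] <;> ring

theorem if_lt_min (x y : Int) : (if y < x then y else x) = min x y := by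
  rw [min_def]; split_ifs <;> omega

theorem alt_take (lst : List Int) (n : Int) (h : 0 ≤ n) :
    minduration_alt lst n = chunkFlush ((lst.take n.toNat).foldl chunkStep (0, none, 0)) := by
  unfold minduration_alt
  rw [PySem.List.slice_to lst h]

theorem alt_nonpos (lst : List Int) : minduration_alt lst 0 = 0 := by
  rw [alt_take lst 0 le_rfl]
  simp [chunkFlush]

theorem minduration_alt_step (a b c : Int) (t : List Int) (n : Int) (hn : 3 ≤ n) :
    minduration_alt (a :: b :: c :: t) n = min (min a b) c + minduration_alt t (n - 3) := by
  rw [alt_take _ n (by omega), alt_take t (n - 3) (by omega)]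
  have htk : (a :: b :: c :: t).take n.toNat = a :: b :: c :: t.take (n - 3).toNat := by
    have : n.toNat = ((n - 3).toNat + 1 + 1) + 1 := by omega
    rw [this]
    simp [List.take]
  rw [htk]
  simp only [List.foldl]
  have s1 : chunkStep (0, none, 0) a = (0, some a, 1) := by
    simp [chunkStep]
  have s2 : chunkStep (0, some a, 1) b = (0, some (if b < a then b else a), 2) := by
    simp [chunkStep]
  have s3 : chunkStep (0, some (if b < a then b else a), 2) c
      = (0 + (if c < (if b < a then b else a) then c else (if b < a then b else a)), none, 0) := by
    simp [chunkStep]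
  rw [s1, s2, s3]
  have hM : (0 : Int) + (if c < (if b < a then b else a) then c else (if b < a then b else a))
      = min (min a b) c := by
    rw [if_lt_min a b, if_lt_min (min a b) c, zero_add]
  rw [hM]
  have := foldl_chunkStep_shift (t.take (n - 3).toNat) (min (min a b) c) 0 none 0
  rw [(by ring : min (min a b) c + (0:Int) = min (min a b) c)] at this
  rw [this, chunkFlush_shift]

theorem base_zero (lst : List Int) : minduration lst 0 = minduration_alt lst 0 := by
  simp only [minduration, mod3_lit 0 (by norm_num) (by norm_num)]
  rw [alt_nonpos, mindurLoop_stop _ _ _ _ (by norm_num)]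
  norm_num

theorem base_one (a : Int) (t : List Int) : minduration (a :: t) 1 = minduration_alt (a :: t) 1 := by
  have hm : PySem.Int.mod 1 3 = 1 := mod3_lit 1 (by norm_num) (by norm_num)
  rw [alt_take _ 1 (by norm_num)]
  have : ((1 : Int)).toNat = 1 := rfl
  rw [this]
  simp only [List.take, List.foldl]
  have s1 : chunkStep (0, none, 0) a = (0, some a, 1) := by simp [chunkStep]
  rw [s1]
  simp only [chunkFlush, minduration, hm]
  norm_num [PySem.List.pyGetD_zero_cons]
  rw [mindurLoop_stop _ _ _ _ (by norm_num)]

theorem base_two (a b : Int) (t : List Int) :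
    minduration (a :: b :: t) 2 = minduration_alt (a :: b :: t) 2 := by
  have hm : PySem.Int.mod 2 3 = 2 := mod3_lit 2 (by norm_num) (by norm_num)
  rw [alt_take _ 2 (by norm_num)]
  have : ((2 : Int)).toNat = 2 := rfl
  rw [this]
  simp only [List.take, List.foldl]
  have s1 : chunkStep (0, none, 0) a = (0, some a, 1) := by simp [chunkStep]
  have s2 : chunkStep (0, some a, 1) b = (0, some (if b < a then b else a), 2) := by
    simp [chunkStep]
  rw [s1, s2]
  simp only [chunkFlush, minduration, hm]
  have h1 : PySem.List.pyGetD (a :: b :: t) (1 : Int) 0 = b := by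
    rw [(show (1:Int) = 0 + 1 by norm_num), pyGetD_cons_succ a _ _ le_rfl,
        PySem.List.pyGetD_zero_cons]
  norm_num [h1, PySem.List.pyGetD_zero_cons]
  rw [mindurLoop_stop _ _ _ _ (by norm_num), if_lt_min a b, zero_add, min_comm b a]

theorem main_equiv : ∀ (k : Nat) (lst : List Int) (n : Int), n.toNat ≤ k → 0 ≤ n →
    n ≤ lst.length → minduration lst n = minduration_alt lst n := by
  intro k
  induction k with
  | zero =>
    intro lst n hk h0 _
    have : n = 0 := by omega
    subst this
    exact base_zero lst
  | succ k ih =>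
    intro lst n hk h0 hlen
    by_cases h3 : 3 ≤ n
    · rcases lst with _ | ⟨a, _ | ⟨b, _ | ⟨c, t⟩⟩⟩ <;> simp only [List.length] at hlen
      · omega
      · omega
      · omega
      · rw [minduration_step a b c t n h3, minduration_alt_step a b c t n h3,
            ih t (n - 3) (by omega) (by omega) (by omega)]
    · have : n = 0 ∨ n = 1 ∨ n = 2 := by omega
      rcases this with rfl | rfl | rfl
      · exact base_zero lst
      · rcases lst with _ | ⟨a, t⟩
        · norm_num at hlen
        · exact base_one a t
      · rcases lst with _ | ⟨a, _ | ⟨b, t⟩⟩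
        · norm_num at hlen
        · norm_num at hlen
        · exact base_two a b t

-- ===== VERDICT (by name: the statement is the Claim_ definition above) =====
theorem minduration_spec : Claim_equal_minduration := by
  intro lst n _ hpre
  exact main_equiv n.toNat lst n le_rfl hpre.1 hpre.2
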